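-- pv_equiv track=rewrite | github.com/floydhub/textutil-filter-seq2seq-data | filter.py | filter_sentences
-- ===== SOURCE A (Python) =====
-- def filter_sentences(sentences, max_words=25, src=False):
--     """
--     Filter sentences to satisfy maxWords.
--     If src, keep the last sentences
--     If tgt, keep only the first sentences
--     """
--     if src:
--         sentences = reversed(list(sentences))
--
--     lines = []
--     word_count = 0
--     for sentence in sentences:
--         num_words = len(sentence)
--         if word_count == 0 or word_count + num_words <= max_words:
--             lines.append(str(sentence))
--             word_count += num_words
--         else:
--             break
--
--     if src:
--         lines = reversed(lines)
--
--     return ' '.join(lines)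
-- ===== SOURCE B (Python) =====
-- from itertools import accumulate
--
-- def filter_sentences(sentences, max_words=25, src=False):
--     sents = list(sentences)
--     if src:
--         sents.reverse()
--     pre = [0] + list(accumulate(len(s) for s in sents))
--     # keep the leading sentences i with pre[i] == 0 (nothing kept yet counts 0 words)
--     # or pre[i+1] <= max_words; this condition is prefix-closed, so counting it gives the cut.
--     k = sum(pre[i] == 0 or pre[i + 1] <= max_words for i in range(len(sents)))
--     kept = sents[:k]
--     if src:
--         kept.reverse()
--     return ' '.join(map(str, kept))
-- ===== Notes on version B (the rewrite author's own statement) =====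
-- stated objective: alternative
-- what changed: Replaces A's stateful accumulation loop with break by a prefix-sum list (itertools.accumulate), a counted cut index over that list, and a slice.
import Mathlib
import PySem

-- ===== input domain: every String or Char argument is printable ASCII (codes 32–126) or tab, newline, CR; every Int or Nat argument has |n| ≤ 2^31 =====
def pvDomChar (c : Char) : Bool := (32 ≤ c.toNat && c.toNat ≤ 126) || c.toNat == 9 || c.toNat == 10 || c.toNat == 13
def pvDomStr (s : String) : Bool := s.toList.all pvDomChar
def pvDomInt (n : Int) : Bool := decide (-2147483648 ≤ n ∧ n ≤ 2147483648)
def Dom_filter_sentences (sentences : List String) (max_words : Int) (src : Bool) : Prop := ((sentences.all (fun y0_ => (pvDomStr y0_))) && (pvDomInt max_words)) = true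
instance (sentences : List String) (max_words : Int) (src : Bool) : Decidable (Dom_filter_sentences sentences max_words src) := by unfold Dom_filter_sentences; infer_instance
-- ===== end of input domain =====

-- B replaces A's break-on-overflow accumulation loop by a prefix-sum (itertools.accumulate)
-- cut-index computation followed by a slice; objective: alternative decomposition (same cost).


-- ===== PORT A =====
-- the 'for sentence in sentences: … else: break' loop, step for step
def filterLoopA (max_words : Int) : List String → Int → List String → List String
  | [], _, lines => lines
  | s :: rest, word_count, lines =>
    let num_words : Int := PySem.Str.len s
    if word_count = 0 ∨ word_count + num_words ≤ max_words then
      filterLoopA max_words rest (word_count + num_words) (lines ++ [s])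
    else lines

def filter_sentences (sentences : List String) (max_words : Int) (src : Bool) : String :=
  let sents := if src then sentences.reverse else sentences
  let lines := filterLoopA max_words sents 0 []
  let lines := if src then lines.reverse else lines
  PySem.Str.join " " lines

-- ===== PORT B =====
def filter_sentences_alt (sentences : List String) (max_words : Int) (src : Bool) : String :=
  let sents := if src then sentences.reverse else sentences
  -- pre = [0] + list(accumulate(len(s) for s in sents))  (scanl produces exactly that list)
  let pre : List Int := List.scanl (fun acc s => acc + PySem.Str.len s) 0 sents
  -- k = sum(pre[i] == 0 or pre[i+1] <= max_words for i in range(len(sents)))  (sum of booleans = count)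
  let k : Nat := (List.range sents.length).countP
      (fun i => pre.getD i 0 == 0 || decide (pre.getD (i + 1) 0 ≤ max_words))
  let kept := sents.take k
  let kept := if src then kept.reverse else kept
  PySem.Str.join " " kept

-- ===== PRECONDITION & SPEC =====
def Spec_filter_sentences (sentences : List String) (max_words : Int) (src : Bool) (out : String) : Prop := out = filter_sentences_alt sentences max_words src
instance (sentences : List String) (max_words : Int) (src : Bool) (out : String) : Decidable (Spec_filter_sentences sentences max_words src out) := by unfold Spec_filter_sentences; infer_instance

-- ===== CLAIM (what is proved, stated in full; the proofs are below) =====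
def Claim_equal_filter_sentences : Prop := ∀ (sentences : List String) (max_words : Int) (src : Bool), Dom_filter_sentences sentences max_words src → Spec_filter_sentences sentences max_words src (filter_sentences sentences max_words src)

-- ===== LEMMAS AND PROOFS =====

-- number of sentences A's loop keeps, as a recursion on the list
def cutA (max_words : Int) : Int → List String → Nat
  | _, [] => 0
  | word_count, s :: rest =>
    if word_count = 0 ∨ word_count + PySem.Str.len s ≤ max_words then
      cutA max_words (word_count + PySem.Str.len s) rest + 1
    else 0

theorem len_nonneg (s : String) : 0 ≤ PySem.Str.len s := by
  rw [PySem.Str.len_eq]; exact Int.natCast_nonneg _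

theorem loopA_eq_take (max_words : Int) (ss : List String) :
    ∀ (wc : Int) (lines : List String),
      filterLoopA max_words ss wc lines = lines ++ ss.take (cutA max_words wc ss) := by
  induction ss with
  | nil => intro wc lines; simp [filterLoopA, cutA]
  | cons s rest ih =>
    intro wc lines
    by_cases h : wc = 0 ∨ wc + PySem.Str.len s ≤ max_words
    · simp only [filterLoopA, cutA, if_pos h, ih]
      simp
    · simp only [filterLoopA, cutA]
      rw [if_neg h, if_neg h]
      simp

theorem scanl_head (w : Int) (l : List String) :
    (List.scanl (fun acc s => acc + PySem.Str.len s) w l).getD 0 0 = w := by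
  cases l <;> simp [List.scanl]

theorem scanl_ge (l : List String) : ∀ (w : Int),
    ∀ x ∈ List.scanl (fun acc s => acc + PySem.Str.len s) w l, w ≤ x := by
  induction l with
  | nil => intro w x hx; simp [List.scanl] at hx; omega
  | cons s rest ih =>
    intro w x hx
    rw [List.scanl_cons] at hx
    rcases List.mem_cons.1 hx with h | h
    · omega
    · have := ih (w + PySem.Str.len s) x h
      have := len_nonneg s
      omega

theorem count_eq_cutA (max_words : Int) (ss : List String) : ∀ (w : Int), 0 ≤ w →
    (List.range ss.length).countP
        (fun i => (List.scanl (fun acc s => acc + PySem.Str.len s) w ss).getD i 0 == 0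
          || decide ((List.scanl (fun acc s => acc + PySem.Str.len s) w ss).getD (i + 1) 0 ≤ max_words))
      = cutA max_words w ss := by
  induction ss with
  | nil => intro w _; simp [cutA]
  | cons s rest ih =>
    intro w hw
    rw [List.scanl_cons]
    set L := List.scanl (fun acc s => acc + PySem.Str.len s) (w + PySem.Str.len s) rest with hL
    have hLlen : L.length = rest.length + 1 := List.length_scanl
    rw [List.length_cons, List.range_succ_eq_map, List.countP_cons, List.countP_map]
    have hhead : L.getD 0 0 = w + PySem.Str.len s := scanl_head _ _
    by_cases h : w = 0 ∨ w + PySem.Str.len s ≤ max_words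
    · have hp : ((w :: L).getD 0 0 == 0 || decide ((w :: L).getD (0 + 1) 0 ≤ max_words)) = true := by
        simp only [List.getD_cons_zero, List.getD_cons_succ, hhead, Bool.or_eq_true,
          beq_iff_eq, decide_eq_true_eq]
        exact h
      rw [hp]
      have : (fun i => ((w :: L).getD i 0 == 0 || decide ((w :: L).getD (i + 1) 0 ≤ max_words)) : Nat → Bool) ∘ Nat.succ
          = fun i => (L.getD i 0 == 0 || decide (L.getD (i + 1) 0 ≤ max_words)) := by
        funext i; simp [Function.comp]
      rw [this, ih (w + PySem.Str.len s) (by have := len_nonneg s; omega)]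
      simp only [cutA]
      rw [if_pos h]
      simp
    · push_neg at h
      obtain ⟨hne, hgt⟩ := h
      have hwpos : 0 < w + PySem.Str.len s := by have := len_nonneg s; omega
      have hzero : List.countP
          ((fun i => ((w :: L).getD i 0 == 0 || decide ((w :: L).getD (i + 1) 0 ≤ max_words)) : Nat → Bool) ∘ Nat.succ)
          (List.range rest.length) = 0 := by
        rw [List.countP_eq_zero]
        intro i hi
        have hi' : i < rest.length := List.mem_range.1 hi
        simp only [Function.comp, List.getD_cons_succ]
        have h1 : L.getD i 0 ∈ L := by
          rw [List.getD_eq_getElem L 0 (by omega)]; exact List.getElem_mem _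
        have h2 : L.getD (i + 1) 0 ∈ L := by
          rw [List.getD_eq_getElem L 0 (by omega)]; exact List.getElem_mem _
        have g1 := scanl_ge rest (w + PySem.Str.len s) _ h1
        have g2 := scanl_ge rest (w + PySem.Str.len s) _ h2
        simp only [Bool.or_eq_true, beq_iff_eq, decide_eq_true_eq, not_or]
        constructor
        · omega
        · omega
      have hp : ((w :: L).getD 0 0 == 0 || decide ((w :: L).getD (0 + 1) 0 ≤ max_words)) = false := by
        simp only [List.getD_cons_zero, List.getD_cons_succ, hhead, Bool.or_eq_false_iff,
          beq_eq_false_iff_ne, ne_eq, decide_eq_false_iff_not, not_le]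
        exact ⟨hne, hgt⟩
      rw [hp, hzero]
      simp only [cutA]
      rw [if_neg (show ¬(w = 0 ∨ w + PySem.Str.len s ≤ max_words) from
        fun hc => Or.elim hc (fun h0 => hne h0) (fun hle => absurd hle (not_le.2 hgt)))]
      simp

-- ===== VERDICT (by name: the statement is the Claim_ definition above) =====
theorem filter_sentences_spec : Claim_equal_filter_sentences := by
  intro sentences max_words src _
  unfold Spec_filter_sentences filter_sentences filter_sentences_alt
  simp only []
  set sents := if src then sentences.reverse else sentences with hs
  have hcount := count_eq_cutA max_words sents 0 le_rfl
  rw [hcount, loopA_eq_take]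
  simp
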